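-- pv_equiv track=rewrite | github.com/skn-ai14-250409/SKN14-Final-4Team-AI | style_rules/build_style_rules_v2.py | pair_in_sentence
-- ===== SOURCE A (Python) =====
-- def pair_in_sentence(sent, item_map, sit_map):
--     items = list(item_map.keys())
--     sits = list(sit_map.keys())
--     pairs = []
--     for si in sits:
--         for it in items:
--             # simple proximity: min distance between any positions
--             dmin = min(abs(a - b) for a in sit_map[si] for b in item_map[it])
--             if dmin <= 60:  # ~ 60 chars window
--                 pairs.append((si, it, "same_sentence"))
--     return pairs
-- ===== SOURCE B (Python) =====
-- def _min_gap(xs, ys):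
--     # xs, ys sorted ascending; min |x - y| over all pairs by a two-pointer merge
--     i = j = 0
--     best = None
--     while i < len(xs) and j < len(ys):
--         d = abs(xs[i] - ys[j])
--         if best is None or d < best:
--             best = d
--         if xs[i] <= ys[j]:
--             i += 1
--         else:
--             j += 1
--     return best
--
--
-- def pair_in_sentence(sent, item_map, sit_map):
--     item_sorted = [(it, sorted(ps)) for it, ps in item_map.items()]
--     pairs = []
--     for si, sp in sit_map.items():
--         ssp = sorted(sp)
--         for it, ip in item_sorted:
--             g = _min_gap(ssp, ip)
--             if g is not None and g <= 60:
--                 pairs.append((si, it, "same_sentence"))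
--     return pairs
-- ===== Notes on version B (the rewrite author's own statement) =====
-- stated objective: faster
-- what changed: B sorts each position list once and computes the min |a-b| per (situation, item) pair with a two-pointer merge over the two sorted lists, instead of A's brute-force min over all position pairs.
import Mathlib
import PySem

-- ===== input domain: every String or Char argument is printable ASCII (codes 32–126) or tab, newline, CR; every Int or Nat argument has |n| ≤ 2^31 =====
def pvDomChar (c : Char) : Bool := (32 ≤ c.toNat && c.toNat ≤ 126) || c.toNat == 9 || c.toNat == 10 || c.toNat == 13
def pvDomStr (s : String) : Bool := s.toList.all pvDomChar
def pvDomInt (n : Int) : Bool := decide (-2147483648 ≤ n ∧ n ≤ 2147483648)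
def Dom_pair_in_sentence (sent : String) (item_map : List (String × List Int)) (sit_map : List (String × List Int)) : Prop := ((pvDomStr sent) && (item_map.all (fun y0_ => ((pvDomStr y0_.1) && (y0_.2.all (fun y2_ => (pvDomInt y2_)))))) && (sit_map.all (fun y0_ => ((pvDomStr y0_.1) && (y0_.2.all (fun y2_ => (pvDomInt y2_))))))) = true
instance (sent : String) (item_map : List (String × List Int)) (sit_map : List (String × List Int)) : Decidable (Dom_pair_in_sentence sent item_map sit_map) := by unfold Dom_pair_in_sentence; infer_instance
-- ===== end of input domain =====

-- B replaces A's brute-force min over all position pairs (O(n·m) per pair of keys) by a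
-- two-pointer minimum-gap merge over the position lists sorted once (O((n+m) log) per key pair).
-- Equivalence is about the return value; neither program mutates its arguments.

-- ===== PORT A =====
-- min(abs(a - b) for a in sit_map[si] for b in item_map[it]) — the list of all |a - b|
def pvDists (xs ys : List Int) : List Int := xs.flatMap (fun a => ys.map (fun b => |a - b|))

def pair_in_sentence (sent : String) (item_map : List (String × List Int)) (sit_map : List (String × List Int)) : List (String × String × String) :=
  let itemd := PySem.Dict.ofList item_map
  let sitd := PySem.Dict.ofList sit_map
  let items := PySem.Dict.keys itemd
  let sits := PySem.Dict.keys sitd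
  sits.foldl (fun pairs si =>
    items.foldl (fun pairs it =>
      match PySem.List.min? (pvDists (PySem.Dict.getD sitd si []) (PySem.Dict.getD itemd it [])) (fun x => x) with
      | some dmin => if dmin ≤ 60 then pairs ++ [(si, it, "same_sentence")] else pairs
      | none => pairs   -- Python raises ValueError here (min of an empty sequence); excluded by Pre_
      ) pairs) []

-- ===== PORT B =====
-- _min_gap: two-pointer merge over two ascending lists, tracking the best |x - y| seen
def pvMinGapGo : Nat → List Int → List Int → Option Int → Option Int
  | Nat.succ n, a :: as, b :: bs, best =>
      let d := |a - b|
      let best' := match best with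
        | none => some d
        | some bv => some (if d < bv then d else bv)
      if a ≤ b then pvMinGapGo n as (b :: bs) best'
      else pvMinGapGo n (a :: as) bs best'
  | _, _, _, best => best

def pvMinGapAux (xs ys : List Int) (best : Option Int) : Option Int :=
  pvMinGapGo (xs.length + ys.length) xs ys best  -- fuel = loop bound; purely a totality guard

def pair_in_sentence_alt (sent : String) (item_map : List (String × List Int)) (sit_map : List (String × List Int)) : List (String × String × String) :=
  let itemd := PySem.Dict.ofList item_map
  let sitd := PySem.Dict.ofList sit_map
  let item_sorted := itemd.items.map (fun p => (p.1, PySem.List.sorted p.2 (fun x => x) false))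
  sitd.items.foldl (fun pairs p =>
    let ssp := PySem.List.sorted p.2 (fun x => x) false
    item_sorted.foldl (fun pairs q =>
      match pvMinGapAux ssp q.2 none with
      | some g => if g ≤ 60 then pairs ++ [(p.1, q.1, "same_sentence")] else pairs
      | none => pairs) pairs) []

-- ===== PRECONDITION & SPEC =====
-- Pre_ excludes exactly the inputs on which A raises ValueError: both dicts nonempty while
-- some position list (as the dict stores it) is empty — min() of an empty sequence.
def Pre_pair_in_sentence (sent : String) (item_map : List (String × List Int)) (sit_map : List (String × List Int)) : Prop :=
  (PySem.Dict.ofList sit_map).items = [] ∨ (PySem.Dict.ofList item_map).items = [] ∨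
  ((∀ p ∈ (PySem.Dict.ofList sit_map).items, p.2 ≠ []) ∧ (∀ p ∈ (PySem.Dict.ofList item_map).items, p.2 ≠ []))
instance (sent : String) (item_map : List (String × List Int)) (sit_map : List (String × List Int)) : Decidable (Pre_pair_in_sentence sent item_map sit_map) := by unfold Pre_pair_in_sentence; infer_instance

def pvWitness_pair_in_sentence : String × (List (String × List Int)) × (List (String × List Int)) :=
  ("", [("lipstick", [3, 80])], [("date", [50])])

def Spec_pair_in_sentence (sent : String) (item_map : List (String × List Int)) (sit_map : List (String × List Int)) (out : List (String × String × String)) : Prop := out = pair_in_sentence_alt sent item_map sit_map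
instance (sent : String) (item_map : List (String × List Int)) (sit_map : List (String × List Int)) (out : List (String × String × String)) : Decidable (Spec_pair_in_sentence sent item_map sit_map out) := by unfold Spec_pair_in_sentence; infer_instance

-- ===== CLAIM (what is proved, stated in full; the proofs are below) =====
def Claim_equal_pair_in_sentence : Prop := ∀ (sent : String) (item_map : List (String × List Int)) (sit_map : List (String × List Int)), Dom_pair_in_sentence sent item_map sit_map → Pre_pair_in_sentence sent item_map sit_map → Spec_pair_in_sentence sent item_map sit_map (pair_in_sentence sent item_map sit_map)


-- ===== LEMMAS AND PROOFS =====

-- a minimum as a fold over Option Int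
def pvOMin : Option Int → Option Int → Option Int
  | none, o => o
  | some b, none => some b
  | some b, some m => some (min b m)

def pvPMin (l : List Int) : Option Int := l.foldl (fun o x => pvOMin o (some x)) none

theorem pvOMin_none_right (o : Option Int) : pvOMin o none = o := by
  cases o <;> rfl

theorem pvOMin_assoc (x y z : Option Int) : pvOMin (pvOMin x y) z = pvOMin x (pvOMin y z) := by
  cases x <;> cases y <;> cases z <;> simp [pvOMin, min_assoc]

theorem pvPMin_foldl (l : List Int) (o : Option Int) :
    l.foldl (fun o x => pvOMin o (some x)) o = pvOMin o (pvPMin l) := by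
  induction l generalizing o with
  | nil => simp [pvPMin, pvOMin_none_right]
  | cons x t ih =>
      simp only [pvPMin, List.foldl_cons] at *
      rw [ih, ih (pvOMin none (some x)), ← pvOMin_assoc]
      rfl

theorem pvPMin_append (l₁ l₂ : List Int) :
    pvPMin (l₁ ++ l₂) = pvOMin (pvPMin l₁) (pvPMin l₂) := by
  simp only [pvPMin, List.foldl_append]
  rw [pvPMin_foldl l₂ (List.foldl (fun o x => pvOMin o (some x)) none l₁)]
  rfl

theorem pvPMin_some_foldl (t : List Int) (x : Int) :
    t.foldl (fun o y => pvOMin o (some y)) (some x) = some (t.foldl min x) := by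
  induction t generalizing x with
  | nil => rfl
  | cons y t ih => simpa [pvOMin] using ih (min x y)

theorem min?_eq_pvPMin (l : List Int) :
    PySem.List.min? l (fun x => x) = pvPMin l := by
  cases l with
  | nil => rfl
  | cons x t =>
      rw [PySem.List.min?_id_cons]
      simp only [pvPMin, List.foldl_cons]
      rw [show pvOMin none (some x) = some x from rfl, pvPMin_some_foldl]

theorem pvPMin_perm {l₁ l₂ : List Int} (h : l₁.Perm l₂) : pvPMin l₁ = pvPMin l₂ := by
  have : ∀ (o : Option Int) (x y : Int),
      pvOMin (pvOMin o (some x)) (some y) = pvOMin (pvOMin o (some y)) (some x) := by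
    intro o x y; cases o <;> simp [pvOMin, min_comm, min_assoc, min_left_comm]
  exact @List.Perm.foldl_eq _ _ _ _ _ ⟨this⟩ h none

theorem pvPMin_of_head_min (x : Int) (t : List Int) (h : ∀ y ∈ t, x ≤ y) :
    pvPMin (x :: t) = some x := by
  simp only [pvPMin, List.foldl_cons]
  rw [show pvOMin none (some x) = some x from rfl, pvPMin_some_foldl]
  congr 1
  induction t generalizing x with
  | nil => rfl
  | cons y t ih =>
      have hxy : x ≤ y := h y (by simp)
      simp only [List.foldl_cons, min_eq_left hxy]
      exact ih x (fun z hz => h z (by simp [hz]))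

theorem pvDists_nil_right (xs : List Int) : pvDists xs [] = [] := by
  simp [pvDists]

theorem pvDists_cons_left (a : Int) (xs ys : List Int) :
    pvDists (a :: xs) ys = ys.map (fun b => |a - b|) ++ pvDists xs ys := by
  simp [pvDists]

theorem pvDists_cons_right (xs : List Int) (b : Int) (bs : List Int) :
    (pvDists xs (b :: bs)).Perm (xs.map (fun a => |a - b|) ++ pvDists xs bs) := by
  induction xs with
  | nil => simp [pvDists]
  | cons a xs ih =>
      rw [pvDists_cons_left, pvDists_cons_left]
      simp only [List.map_cons, List.cons_append]
      refine List.Perm.cons _ ?_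
      refine (List.Perm.append_left _ ih).trans ?_
      rw [← List.append_assoc, ← List.append_assoc]
      exact List.Perm.append_right _ List.perm_append_comm

theorem pvMinGapGo_succ_cons (n : Nat) (a : Int) (as : List Int) (b : Int) (bs : List Int)
    (best : Option Int) :
    pvMinGapGo (n + 1) (a :: as) (b :: bs) best =
      if a ≤ b then pvMinGapGo n as (b :: bs) (pvOMin best (some |a - b|))
      else pvMinGapGo n (a :: as) bs (pvOMin best (some |a - b|)) := by
  cases best with
  | none => simp [pvMinGapGo, pvOMin]
  | some bv =>
      have h : (some (if |a - b| < bv then |a - b| else bv) : Option Int)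
          = pvOMin (some bv) (some |a - b|) := by
        simp only [pvOMin]
        congr 1
        rw [min_def]
        split_ifs <;> omega
      simp only [pvMinGapGo, ← h]

-- the two-pointer merge over sorted lists computes the minimum over ALL pairs
theorem pvMinGapGo_correct : ∀ (n : Nat) (xs ys : List Int) (best : Option Int),
    xs.length + ys.length ≤ n →
    List.Pairwise (· ≤ ·) xs → List.Pairwise (· ≤ ·) ys →
    pvMinGapGo n xs ys best = pvOMin best (pvPMin (pvDists xs ys)) := by
  intro n
  induction n with
  | zero =>
      intro xs ys best hn _ _
      have hx : xs = [] := by cases xs <;> simp_all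
      subst hx
      simp [pvMinGapGo, pvPMin, pvOMin_none_right, show pvDists [] ys = [] from rfl]
  | succ n ih =>
      intro xs ys best hn hxs hys
      match xs, ys with
      | [], ys => simp [pvMinGapGo, pvPMin, pvOMin_none_right, show pvDists [] ys = [] from rfl]
      | a :: as, [] => simp [pvMinGapGo, pvDists_nil_right, pvPMin, pvOMin_none_right]
      | a :: as, b :: bs =>
          rw [pvMinGapGo_succ_cons]
          by_cases hab : a ≤ b
          · rw [if_pos hab]
            rw [ih as (b :: bs) _ (by simp at hn ⊢; omega) hxs.tail hys]
            have hrow : pvPMin ((b :: bs).map (fun b' => |a - b'|)) = some |a - b| := by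
              simp only [List.map_cons]
              apply pvPMin_of_head_min
              intro y hy
              simp only [List.mem_map] at hy
              obtain ⟨b', hb', rfl⟩ := hy
              have hbb' : b ≤ b' := (List.pairwise_cons.mp hys).1 b' hb'
              have h1 : |a - b| = b - a := by rw [abs_sub_comm]; exact abs_of_nonneg (by omega)
              have h2 : b' - a ≤ |a - b'| := by
                rw [abs_sub_comm]; exact le_abs_self _
              omega
            rw [pvDists_cons_left, pvPMin_append, hrow, pvOMin_assoc]
          · rw [if_neg hab]
            push_neg at hab
            rw [ih (a :: as) bs _ (by simp at hn ⊢; omega) hxs hys.tail]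
            have hcol : pvPMin ((a :: as).map (fun a' => |a' - b|)) = some |a - b| := by
              simp only [List.map_cons]
              apply pvPMin_of_head_min
              intro y hy
              simp only [List.mem_map] at hy
              obtain ⟨a', ha', rfl⟩ := hy
              have haa' : a ≤ a' := (List.pairwise_cons.mp hxs).1 a' ha'
              have h1 : |a - b| = a - b := abs_of_nonneg (by omega)
              have h2 : a' - b ≤ |a' - b| := le_abs_self _
              omega
            rw [pvPMin_perm (pvDists_cons_right (a :: as) b bs), pvPMin_append, hcol, pvOMin_assoc]

-- the per-cell results of the two ports are equal (sorting does not change the set of pairs)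
theorem pvCell_eq (xs ys : List Int) :
    pvMinGapAux (PySem.List.sorted xs (fun x => x) false) (PySem.List.sorted ys (fun x => x) false) none
      = PySem.List.min? (pvDists xs ys) (fun x => x) := by
  set sxs := PySem.List.sorted xs (fun x => x) false with hsx
  set sys := PySem.List.sorted ys (fun x => x) false with hsy
  have hpx : List.Pairwise (· ≤ ·) sxs := by
    simpa using PySem.List.sorted_pairwise xs (fun x => x)
  have hpy : List.Pairwise (· ≤ ·) sys := by
    simpa using PySem.List.sorted_pairwise ys (fun x => x)
  rw [show pvMinGapAux sxs sys none = pvMinGapGo (sxs.length + sys.length) sxs sys none from rfl]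
  rw [pvMinGapGo_correct (sxs.length + sys.length) sxs sys none le_rfl hpx hpy]
  rw [show pvOMin none (pvPMin (pvDists sxs sys)) = pvPMin (pvDists sxs sys) from rfl]
  rw [min?_eq_pvPMin]
  apply pvPMin_perm
  have h1 : (pvDists sxs sys).Perm (pvDists xs sys) :=
    List.Perm.flatMap_right _ (PySem.List.sorted_perm xs _ _)
  have h2 : (pvDists xs sys).Perm (pvDists xs ys) :=
    List.Perm.flatMap_left _ (fun a _ => List.Perm.map _ (PySem.List.sorted_perm ys _ _))
  exact h1.trans h2

-- fold over a dict's keys looking each key up = fold over its items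
theorem keys_foldl_eq_items_foldl {ν : Type} (d : PySem.Dict String ν) (hn : d.keys.Nodup)
    {β : Type} (F : β → String → ν → β) (dflt : ν) (init : β) :
    d.keys.foldl (fun acc k => F acc k (PySem.Dict.getD d k dflt)) init
      = d.items.foldl (fun acc p => F acc p.1 p.2) init := by
  have hkeys : d.keys = d.items.map Prod.fst := rfl
  rw [hkeys, List.foldl_map]
  apply PySem.List.foldl_congr_mem
  intro acc p hp
  rw [PySem.Dict.getD_of_mem_items d (by exact (show ((p.1, p.2) ∈ d.items) by simpa using hp)) hn]

-- the two ports agree on EVERY input (on raising inputs both ports skip the offending pair)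
theorem ports_eq (sent : String) (item_map sit_map : List (String × List Int)) :
    pair_in_sentence sent item_map sit_map = pair_in_sentence_alt sent item_map sit_map := by
  unfold pair_in_sentence pair_in_sentence_alt
  simp only []
  rw [keys_foldl_eq_items_foldl (PySem.Dict.ofList sit_map) (PySem.Dict.nodup_keys_ofList _)
      (fun acc si sp => (PySem.Dict.ofList item_map).keys.foldl (fun pairs it =>
        match PySem.List.min? (pvDists sp (PySem.Dict.getD (PySem.Dict.ofList item_map) it [])) (fun x => x) with
        | some dmin => if dmin ≤ 60 then pairs ++ [(si, it, "same_sentence")] else pairs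
        | none => pairs) acc) [] []]
  apply PySem.List.foldl_congr_mem
  intro acc p _
  rw [keys_foldl_eq_items_foldl (PySem.Dict.ofList item_map) (PySem.Dict.nodup_keys_ofList _)
      (fun pairs it ip =>
        match PySem.List.min? (pvDists p.2 ip) (fun x => x) with
        | some dmin => if dmin ≤ 60 then pairs ++ [(p.1, it, "same_sentence")] else pairs
        | none => pairs) [] acc]
  rw [List.foldl_map]
  apply PySem.List.foldl_congr_mem
  intro acc2 q _
  rw [pvCell_eq p.2 q.2]

-- ===== VERDICT (by name: the statement is the Claim_ definition above) =====
theorem pair_in_sentence_spec : Claim_equal_pair_in_sentence := by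
  intro sent item_map sit_map _ _
  unfold Spec_pair_in_sentence
  exact ports_eq sent item_map sit_map
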